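-- pv_equiv track=rewrite | github.com/jliu2006/usaco | usaco.org/202112/bronze/2021_dec_bronze_2.py | getLastIndex
-- ===== SOURCE A (Python) =====
-- def getLastIndex(init_temp, final_temp, change):
--     i = len(init_temp)-1
--     while i >= 0:
--         delta = final_temp[i] - init_temp[i]
--         if (delta > 0) and (change == 'add'):
--             return i
--         elif (delta < 0) and (change == 'minus'):
--             return i
--         i -= 1
-- ===== SOURCE B (Python) =====
-- def getLastIndex(init_temp, final_temp, change):
--     result = None
--     for i in range(len(init_temp)):
--         delta = final_temp[i] - init_temp[i]
--         if (change == 'add' and delta > 0) or (change == 'minus' and delta < 0):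
--             result = i
--     return result
-- ===== Notes on version B (the rewrite author's own statement) =====
-- stated objective: alternative
-- what changed: Replaces A's backward while-loop with early return by a single forward pass that overwrites an accumulator on each matching index and returns it after the loop.
-- outside the precondition, e.g. on getLastIndex([1], [], 'add'): A raises IndexError, B raises IndexError
import Mathlib
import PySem

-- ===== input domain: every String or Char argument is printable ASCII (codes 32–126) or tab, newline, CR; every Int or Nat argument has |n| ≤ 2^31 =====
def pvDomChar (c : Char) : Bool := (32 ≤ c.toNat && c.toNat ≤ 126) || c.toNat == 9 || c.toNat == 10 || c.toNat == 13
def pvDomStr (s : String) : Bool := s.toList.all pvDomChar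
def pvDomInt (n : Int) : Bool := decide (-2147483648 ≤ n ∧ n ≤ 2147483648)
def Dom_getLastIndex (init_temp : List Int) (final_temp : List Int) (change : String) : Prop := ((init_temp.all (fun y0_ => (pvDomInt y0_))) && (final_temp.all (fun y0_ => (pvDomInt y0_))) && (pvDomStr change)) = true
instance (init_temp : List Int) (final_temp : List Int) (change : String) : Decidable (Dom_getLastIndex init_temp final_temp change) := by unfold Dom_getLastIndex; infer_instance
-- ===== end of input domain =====

-- B replaces A's backward early-return scan by a forward pass with an overwritten accumulator (alternative decomposition, same cost).

-- ===== PORT A =====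
-- A's while-loop counting i down from len(init_temp)-1; n = i+1 (n = 0 is the i < 0 exit).
def getLastIndexGoA (init_temp : List Int) (final_temp : List Int) (change : String) : Nat → Option Int
  | 0 => none
  | n+1 =>
    let i : Int := (n : Int)
    let delta := (PySem.List.pyGet? final_temp i).getD 0 - (PySem.List.pyGet? init_temp i).getD 0
    if delta > 0 ∧ change = "add" then some i
    else if delta < 0 ∧ change = "minus" then some i
    else getLastIndexGoA init_temp final_temp change n

def getLastIndex (init_temp : List Int) (final_temp : List Int) (change : String) : Option Int :=
  getLastIndexGoA init_temp final_temp change init_temp.length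

-- ===== PORT B =====
-- the body of B's for-loop
def getLastIndexStep (init_temp : List Int) (final_temp : List Int) (change : String) (result : Option Int) (i : Nat) : Option Int :=
  let delta := (PySem.List.pyGet? final_temp (i : Int)).getD 0 - (PySem.List.pyGet? init_temp (i : Int)).getD 0
  if (change = "add" ∧ delta > 0) ∨ (change = "minus" ∧ delta < 0) then some (i : Int) else result

def getLastIndex_alt (init_temp : List Int) (final_temp : List Int) (change : String) : Option Int :=
  (List.range init_temp.length).foldl (getLastIndexStep init_temp final_temp change) none

-- ===== PRECONDITION & SPEC =====
-- A raises IndexError (and so does B) when final_temp is shorter than init_temp; those inputs are excluded.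
def Pre_getLastIndex (init_temp : List Int) (final_temp : List Int) (change : String) : Prop :=
  init_temp.length ≤ final_temp.length
instance (init_temp : List Int) (final_temp : List Int) (change : String) : Decidable (Pre_getLastIndex init_temp final_temp change) := by unfold Pre_getLastIndex; infer_instance

def pvWitness_getLastIndex : List Int × List Int × String := ([1, 5, 3], [2, 4, 3], "add")

def Spec_getLastIndex (init_temp : List Int) (final_temp : List Int) (change : String) (out : Option Int) : Prop := out = getLastIndex_alt init_temp final_temp change
instance (init_temp : List Int) (final_temp : List Int) (change : String) (out : Option Int) : Decidable (Spec_getLastIndex init_temp final_temp change out) := by unfold Spec_getLastIndex; infer_instance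

-- ===== CLAIM (what is proved, stated in full; the proofs are below) =====
def Claim_equal_getLastIndex : Prop := ∀ (init_temp : List Int) (final_temp : List Int) (change : String), Dom_getLastIndex init_temp final_temp change → Pre_getLastIndex init_temp final_temp change → Spec_getLastIndex init_temp final_temp change (getLastIndex init_temp final_temp change)

-- ===== LEMMAS AND PROOFS =====
-- Backward first match over 0..n-1 equals forward last match over the same range.
theorem getLastIndexGoA_eq_foldl (init_temp final_temp : List Int) (change : String) :
    ∀ n : Nat, getLastIndexGoA init_temp final_temp change n =
      (List.range n).foldl (getLastIndexStep init_temp final_temp change) none := by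
  intro n
  induction n with
  | zero => simp [getLastIndexGoA]
  | succ n ih =>
    rw [List.range_succ, List.foldl_append, ← ih]
    simp only [List.foldl_cons, List.foldl_nil, getLastIndexGoA, getLastIndexStep]
    split_ifs <;> first | rfl | tauto

-- ===== VERDICT (by name: the statement is the Claim_ definition above) =====
theorem getLastIndex_spec : Claim_equal_getLastIndex := by
  intro init_temp final_temp change _ _
  unfold Spec_getLastIndex getLastIndex getLastIndex_alt
  exact getLastIndexGoA_eq_foldl init_temp final_temp change init_temp.length
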